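-- pv_equiv track=rewrite | github.com/jang-namu/py-algorithm | solved/programmers-Lv1/유연근무제.py | isSuccess
-- ===== SOURCE A (Python) =====
-- def isSuccess(timelog, target_hour, target_minute, startday):
--     date = startday % 7
--     for time in timelog:
--         if date == 6 or date == 0:  # 0 : 일요일
--             date = (date + 1) % 7
--             continue
--         hour = time // 100
--         minute = time % 100
--         if (target_hour > hour) or (target_hour == hour and target_minute >= minute):
--             date = (date + 1) % 7
--             continue
--         return False
--     return True
-- ===== SOURCE B (Python) =====
-- def isSuccess(timelog, target_hour, target_minute, startday):
--     # Stage 1: keep only the arrivals that fall on weekdays (weekday from the index).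
--     weekday_times = [t for i, t in enumerate(timelog)
--                      if (startday + i) % 7 not in (0, 6)]
--     if not weekday_times:
--         return True
--     # Stage 2: only the latest weekday arrival matters (lex order on (t//100, t%100)
--     # coincides with numeric order on t since t % 100 is always in [0, 100)).
--     worst = max(weekday_times)
--     hour, minute = divmod(worst, 100)
--     return target_hour > hour or (target_hour == hour and target_minute >= minute)
-- ===== Notes on version B (the rewrite author's own statement) =====
-- stated objective: alternative
-- what changed: Replaces A's single pass with a running weekday counter and per-entry early return by two staged passes: filter out weekend entries (weekday computed from the index), take the maximum remaining arrival time, and compare the target against that single worst arrival (correct because the lateness test is monotone in the arrival time).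
import Mathlib
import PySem

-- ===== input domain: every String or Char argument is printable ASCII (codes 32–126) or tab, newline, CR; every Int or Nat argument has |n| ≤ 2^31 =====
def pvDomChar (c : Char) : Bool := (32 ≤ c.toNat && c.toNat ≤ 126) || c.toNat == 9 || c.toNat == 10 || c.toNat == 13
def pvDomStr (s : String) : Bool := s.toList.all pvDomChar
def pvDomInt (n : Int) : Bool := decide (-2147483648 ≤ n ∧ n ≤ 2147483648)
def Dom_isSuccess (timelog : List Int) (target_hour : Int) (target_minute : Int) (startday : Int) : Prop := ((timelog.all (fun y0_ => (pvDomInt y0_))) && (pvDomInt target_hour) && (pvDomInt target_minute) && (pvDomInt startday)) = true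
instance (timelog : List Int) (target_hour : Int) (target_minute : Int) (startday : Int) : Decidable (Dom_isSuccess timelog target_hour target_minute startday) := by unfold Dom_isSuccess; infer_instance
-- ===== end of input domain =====

-- B replaces A's single pass with a running weekday accumulator by two staged passes:
-- filter out weekend entries (weekday computed from the index), then compare the target
-- against the single latest remaining arrival (the test is monotone in the arrival time).


-- ===== PORT A =====
-- the for-loop of A, carrying the mutable 'date' accumulator as loop state
def isSuccessLoop (target_hour target_minute : Int) : List Int → Int → Bool
  | [], _ => true
  | time :: rest, date =>
    if date = 6 ∨ date = 0 then
      isSuccessLoop target_hour target_minute rest (PySem.Int.mod (date + 1) 7)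
    else
      let hour := PySem.Int.floordiv time 100
      let minute := PySem.Int.mod time 100
      if target_hour > hour ∨ (target_hour = hour ∧ target_minute ≥ minute) then
        isSuccessLoop target_hour target_minute rest (PySem.Int.mod (date + 1) 7)
      else false

def isSuccess (timelog : List Int) (target_hour : Int) (target_minute : Int) (startday : Int) : Bool :=
  isSuccessLoop target_hour target_minute timelog (PySem.Int.mod startday 7)

-- ===== PORT B =====
def isSuccess_alt (timelog : List Int) (target_hour : Int) (target_minute : Int) (startday : Int) : Bool :=
  let weekday_times := (PySem.List.enumerate timelog).filterMap (fun p =>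
    if PySem.Int.mod (startday + p.1) 7 = 0 ∨ PySem.Int.mod (startday + p.1) 7 = 6 then none
    else some p.2)
  match PySem.List.max? weekday_times (fun x => x) with
  | none => true   -- 'if not weekday_times: return True'
  | some worst =>
    decide (target_hour > PySem.Int.floordiv worst 100) ||
    (decide (target_hour = PySem.Int.floordiv worst 100) &&
     decide (target_minute ≥ PySem.Int.mod worst 100))

-- ===== PRECONDITION & SPEC =====
def Spec_isSuccess (timelog : List Int) (target_hour : Int) (target_minute : Int) (startday : Int) (out : Bool) : Prop := out = isSuccess_alt timelog target_hour target_minute startday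
instance (timelog : List Int) (target_hour : Int) (target_minute : Int) (startday : Int) (out : Bool) : Decidable (Spec_isSuccess timelog target_hour target_minute startday out) := by unfold Spec_isSuccess; infer_instance

-- ===== CLAIM (what is proved, stated in full; the proofs are below) =====
def Claim_equal_isSuccess : Prop := ∀ (timelog : List Int) (target_hour : Int) (target_minute : Int) (startday : Int), Dom_isSuccess timelog target_hour target_minute startday → Spec_isSuccess timelog target_hour target_minute startday (isSuccess timelog target_hour target_minute startday)

-- ===== LEMMAS AND PROOFS =====
-- "arrival t meets the target" as a Bool, the test both programs apply
def okT (th tm t : Int) : Bool :=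
  decide (th > PySem.Int.floordiv t 100) ||
  (decide (th = PySem.Int.floordiv t 100) && decide (tm ≥ PySem.Int.mod t 100))

lemma mod7_step (s : Int) :
    PySem.Int.mod (PySem.Int.mod s 7 + 1) 7 = PySem.Int.mod (s + 1) 7 := by
  simp only [PySem.Int.mod_eq_emod_of_pos (by norm_num : (0:Int) < 7)]
  omega

-- the lateness test is antitone in the arrival time
lemma okT_mono (th tm t m : Int) (htm : t ≤ m) (h : okT th tm m = true) : okT th tm t = true := by
  unfold okT at h ⊢
  rw [PySem.Int.floordiv_eq_ediv_of_pos (by norm_num : (0:Int) < 100),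
      PySem.Int.mod_eq_emod_of_pos (by norm_num : (0:Int) < 100)] at h ⊢
  simp only [Bool.or_eq_true, Bool.and_eq_true, decide_eq_true_eq] at h ⊢
  omega

-- A's accumulator-carrying loop equals "every weekday entry passes the test",
-- with the weekday entries selected by index as in B
lemma loop_eq_all (th tm : Int) : ∀ (xs : List Int) (s i : Int),
    isSuccessLoop th tm xs (PySem.Int.mod s 7) =
    ((PySem.List.enumerate xs i).filterMap (fun p =>
      if PySem.Int.mod (s + (p.1 - i)) 7 = 0 ∨ PySem.Int.mod (s + (p.1 - i)) 7 = 6 then none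
      else some p.2)).all (okT th tm)
  | [], s, i => by simp [isSuccessLoop, PySem.List.enumerate_nil]
  | x :: xs, s, i => by
    have ih := loop_eq_all th tm xs (s + 1) (i + 1)
    have hsh : (fun p : Int × Int =>
        if PySem.Int.mod (s + 1 + (p.1 - (i + 1))) 7 = 0 ∨ PySem.Int.mod (s + 1 + (p.1 - (i + 1))) 7 = 6 then (none : Option Int)
        else some p.2) =
        (fun p : Int × Int =>
        if PySem.Int.mod (s + (p.1 - i)) 7 = 0 ∨ PySem.Int.mod (s + (p.1 - i)) 7 = 6 then none
        else some p.2) := by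
      funext p
      have : s + 1 + (p.1 - (i + 1)) = s + (p.1 - i) := by ring
      rw [this]
    rw [PySem.List.enumerate_cons, List.filterMap_cons]
    simp only [isSuccessLoop, sub_self, add_zero]
    by_cases h : PySem.Int.mod s 7 = 6 ∨ PySem.Int.mod s 7 = 0
    · rw [if_pos h, if_pos (Or.symm h), mod7_step, ih, hsh]
    · rw [if_neg h, if_neg (fun hc => h (Or.symm hc))]
      by_cases h2 : th > PySem.Int.floordiv x 100 ∨ (th = PySem.Int.floordiv x 100 ∧ tm ≥ PySem.Int.mod x 100)
      · rw [if_pos h2, mod7_step, ih, hsh]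
        rw [List.all_cons]
        have : okT th tm x = true := by
          unfold okT
          rcases h2 with h2 | ⟨h2a, h2b⟩
          · rw [decide_eq_true h2, Bool.true_or]
          · rw [decide_eq_true h2a, decide_eq_true h2b, Bool.and_self, Bool.or_true]
        rw [this, Bool.true_and]
      · rw [if_neg h2]
        rw [List.all_cons]
        have : okT th tm x = false := by
          unfold okT
          rcases not_or.mp h2 with ⟨hle, hno⟩
          rw [decide_eq_false hle]
          have hand : (decide (th = PySem.Int.floordiv x 100) && decide (tm ≥ PySem.Int.mod x 100)) = false := by
            by_cases he : th = PySem.Int.floordiv x 100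
            · rw [decide_eq_false (fun hm => hno ⟨he, hm⟩), Bool.and_false]
            · rw [decide_eq_false he, Bool.false_and]
          rw [hand]
          decide
        rw [this, Bool.false_and]

-- "all pass" reduces to "the maximum passes" (antitone test)
lemma all_eq_max (th tm : Int) (ys : List Int) :
    ys.all (okT th tm) =
    (match PySem.List.max? ys (fun x => x) with
     | none => true
     | some m => okT th tm m) := by
  cases hm : PySem.List.max? ys (fun x => x) with
  | none =>
    have : ys = [] := (PySem.List.max?_eq_none_iff ys (fun x => x)).mp hm
    simp [this]
  | some m =>
    have hmem := PySem.List.max?_mem hm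
    have hmax := PySem.List.max?_isMax hm
    show ys.all (okT th tm) = okT th tm m
    by_cases hok : okT th tm m = true
    · rw [hok]
      simp only [List.all_eq_true]
      intro y hy
      exact okT_mono th tm y m (hmax y hy) hok
    · simp only [Bool.not_eq_true] at hok
      rw [hok]
      simp only [List.all_eq_false]
      exact ⟨m, hmem, by simp [hok]⟩

-- ===== VERDICT (by name: the statement is the Claim_ definition above) =====
theorem isSuccess_spec : Claim_equal_isSuccess := by
  intro timelog th tm sd _
  unfold Spec_isSuccess isSuccess isSuccess_alt
  rw [loop_eq_all th tm timelog sd 0]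
  simp only [sub_zero]
  rw [all_eq_max]
  simp only [okT]
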